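-- pv_equiv track=rewrite | github.com/adeebkm/Khairvc | email_classifier.py | check_deck_links
-- ===== SOURCE A (Python) =====
-- from typing import Dict, List, Tuple, Optional
--
-- def check_deck_links(links: List[str]) -> bool:
--     """Check if links contain deck/dataroom indicators"""
--     deck_indicators = [
--         'docsend',
--         'dataroom',
--         'deck',
--         'pitch',
--         'drive.google.com',
--         'dropbox.com',
--         'notion.so'
--     ]
--
--     links_text = ' '.join(links).lower()
--     return any(indicator in links_text for indicator in deck_indicators)
-- ===== SOURCE B (Python) =====
-- DECK_INDICATORS = (
--     'docsend',
--     'dataroom',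
--     'deck',
--     'pitch',
--     'drive.google.com',
--     'dropbox.com',
--     'notion.so',
-- )
--
-- def check_deck_links(links):
--     """Per-link scan: no joined text is built; each link is lowered and
--     checked on its own (no indicator contains a space, so a match can never
--     span the join separator)."""
--     for link in links:
--         low = link.lower()
--         if any(ind in low for ind in DECK_INDICATORS):
--             return True
--     return False
-- ===== Notes on version B (the rewrite author's own statement) =====
-- stated objective: alternative
-- what changed: B drops the ' '.join of all links and scans each link separately with early exit (sound because no indicator contains a space, so a match cannot span the separator), instead of A's indicator-major scan over one concatenated text.
import Mathlib
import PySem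

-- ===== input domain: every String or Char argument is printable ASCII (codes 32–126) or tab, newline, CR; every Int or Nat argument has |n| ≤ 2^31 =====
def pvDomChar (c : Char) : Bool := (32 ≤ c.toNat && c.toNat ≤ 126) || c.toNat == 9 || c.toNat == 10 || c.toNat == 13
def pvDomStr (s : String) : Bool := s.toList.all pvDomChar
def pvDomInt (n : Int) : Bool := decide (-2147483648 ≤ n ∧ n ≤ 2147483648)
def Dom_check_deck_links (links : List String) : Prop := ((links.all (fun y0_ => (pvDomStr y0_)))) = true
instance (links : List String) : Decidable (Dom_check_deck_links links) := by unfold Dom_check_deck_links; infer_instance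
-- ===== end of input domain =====

-- B replaces A's indicator scan over one ' '.join-ed lowered text by a per-link scan with
-- early exit (sound because no indicator contains a space); objective: alternative, same cost.

-- ===== PORT A =====
def check_deck_links (links : List String) : Bool :=
  let deck_indicators : List String :=
    ["docsend", "dataroom", "deck", "pitch", "drive.google.com", "dropbox.com", "notion.so"]
  let links_text := PySem.Str.lower (PySem.Str.join " " links)
  deck_indicators.any (fun indicator => PySem.Str.isIn indicator links_text)

-- ===== PORT B =====
def pvDeckIndicators : List String :=
  ["docsend", "dataroom", "deck", "pitch", "drive.google.com", "dropbox.com", "notion.so"]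

def check_deck_links_alt (links : List String) : Bool :=
  links.any (fun link =>
    let low := PySem.Str.lower link
    pvDeckIndicators.any (fun ind => PySem.Str.isIn ind low))

-- ===== PRECONDITION & SPEC =====
def Spec_check_deck_links (links : List String) (out : Bool) : Prop := out = check_deck_links_alt links
instance (links : List String) (out : Bool) : Decidable (Spec_check_deck_links links out) := by unfold Spec_check_deck_links; infer_instance

-- ===== CLAIM (what is proved, stated in full; the proofs are below) =====
def Claim_equal_check_deck_links : Prop := ∀ (links : List String), Dom_check_deck_links links → Spec_check_deck_links links (check_deck_links links)

-- ===== LEMMAS AND PROOFS =====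

-- a list not containing c is a prefix of a ++ c :: b iff it is a prefix of a
theorem pv_prefix_append_cons {c : Char} (a b : List Char) :
    ∀ sub : List Char, c ∉ sub → (sub <+: a ++ c :: b ↔ sub <+: a) := by
  induction a with
  | nil =>
    intro sub hc
    cases sub with
    | nil => simp
    | cons y s' =>
      simp only [List.nil_append, List.cons_prefix_cons]
      constructor
      · rintro ⟨rfl, _⟩; exact absurd (List.mem_cons_self) hc
      · rintro h; exact absurd h (by simp)
  | cons x a' ih =>
    intro sub hc
    cases sub with
    | nil => simp
    | cons y s' =>
      simp only [List.cons_append, List.cons_prefix_cons]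
      have := ih s' (fun h => hc (List.mem_cons_of_mem _ h))
      tauto

-- a nonempty list not containing c is an infix of a ++ c :: b iff it is an infix of a or of b
theorem pv_infix_append_cons {c : Char} (b : List Char) :
    ∀ (a sub : List Char), sub ≠ [] → c ∉ sub →
      (sub <:+: a ++ c :: b ↔ sub <:+: a ∨ sub <:+: b) := by
  intro a
  induction a with
  | nil =>
    intro sub hne hc
    rw [List.nil_append, List.infix_cons_iff]
    have hp : sub <+: c :: b ↔ sub <+: ([] : List Char) :=
      pv_prefix_append_cons [] b sub hc
    simp only [List.prefix_nil] at hp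
    constructor
    · rintro (h | h)
      · exact absurd (hp.mp h) hne
      · exact Or.inr h
    · rintro (h | h)
      · exact absurd (List.eq_nil_of_infix_nil h) hne
      · exact Or.inr h
  | cons x a' ih =>
    intro sub hne hc
    rw [List.cons_append, List.infix_cons_iff, ih sub hne hc, ← List.cons_append,
        pv_prefix_append_cons (x :: a') b sub hc, List.infix_cons_iff (l₂ := a')]
    tauto

-- a nonempty space-free list is an infix of ' '.join(ps) iff it is an infix of some part
theorem pv_infix_join_space (sub : List Char) (hne : sub ≠ []) (hc : ' ' ∉ sub) :
    ∀ ps : List (List Char), (sub <:+: PySem.Chars.join [' '] ps ↔ ∃ p ∈ ps, sub <:+: p) := by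
  intro ps
  induction ps with
  | nil =>
    rw [PySem.Chars.join_nil]
    simp only [List.not_mem_nil, false_and, exists_false, iff_false]
    exact fun h => hne (List.eq_nil_of_infix_nil h)
  | cons p rest ih =>
    cases rest with
    | nil => simp [PySem.Chars.join_singleton]
    | cons q rest' =>
      rw [PySem.Chars.join_cons_cons, List.append_assoc, List.singleton_append,
          pv_infix_append_cons _ p sub hne hc, ih]
      simp only [List.mem_cons]
      aesop

-- lowering commutes with the space join (lowerChar ' ' = ' ')
theorem pv_lower_join : ∀ ps : List (List Char),
    PySem.Chars.lower (PySem.Chars.join [' '] ps) =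
      PySem.Chars.join [' '] (ps.map PySem.Chars.lower) := by
  intro ps
  induction ps with
  | nil => rfl
  | cons p rest ih =>
    cases rest with
    | nil => simp [PySem.Chars.join_singleton]
    | cons q rest' =>
      rw [PySem.Chars.join_cons_cons, List.map_cons, List.map_cons, PySem.Chars.join_cons_cons]
      simp only [PySem.Chars.lower, List.map_append] at ih ⊢
      rw [ih]
      rfl

theorem pv_indicators_ok :
    ∀ ind ∈ pvDeckIndicators, ind.toList ≠ [] ∧ ' ' ∉ ind.toList := by decide

-- ===== VERDICT (by name: the statement is the Claim_ definition above) =====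
theorem check_deck_links_spec : Claim_equal_check_deck_links := by
  intro links _
  unfold Spec_check_deck_links check_deck_links check_deck_links_alt
  simp only []
  rw [Bool.eq_iff_iff]
  simp only [List.any_eq_true, PySem.Str.isIn_iff_infix, PySem.Str.toList_lower,
    PySem.Str.toList_join]
  have hjoin : PySem.Chars.lower (PySem.Chars.join " ".toList (List.map String.toList links)) =
      PySem.Chars.join [' '] ((List.map String.toList links).map PySem.Chars.lower) :=
    pv_lower_join (List.map String.toList links)
  constructor
  · rintro ⟨ind, hind, hin⟩
    rw [hjoin] at hin
    obtain ⟨hne, hc⟩ := pv_indicators_ok ind hind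
    obtain ⟨p, hp, hsub⟩ := (pv_infix_join_space ind.toList hne hc _).mp hin
    simp only [List.map_map, List.mem_map] at hp
    obtain ⟨link, hlink, rfl⟩ := hp
    exact ⟨link, hlink, ind, hind, hsub⟩
  · rintro ⟨link, hlink, ind, hind, hsub⟩
    obtain ⟨hne, hc⟩ := pv_indicators_ok ind hind
    refine ⟨ind, hind, ?_⟩
    rw [hjoin]
    refine (pv_infix_join_space ind.toList hne hc _).mpr ?_
    exact ⟨PySem.Chars.lower link.toList, by
      simp only [List.map_map, List.mem_map]; exact ⟨link, hlink, rfl⟩, hsub⟩
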